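-- pv_equiv track=rewrite | github.com/SamicChakir/LeetCode-Top-Interview-Questions---Python | Medium Difficulty/SortingAndSearching/TopKFrequent.py | getNumbersWithCertainOccs
-- ===== SOURCE A (Python) =====
-- def getNumbersWithCertainOccs(occs):
--
--     NumbersWithCertainOccs = dict()
--
--     for num in occs.keys():
--         if occs[num] in NumbersWithCertainOccs:
--             NumbersWithCertainOccs[occs[num]].append(num)
--         else:
--             NumbersWithCertainOccs[occs[num]] = [num]
--
--     return NumbersWithCertainOccs
-- ===== SOURCE B (Python) =====
-- def getNumbersWithCertainOccs(occs):
--     items = list(occs.items())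
--     order = list(dict.fromkeys(c for _, c in items))
--     return {c: [num for num, v in items if v == c] for c in order}
-- ===== Notes on version B (the rewrite author's own statement) =====
-- stated objective: alternative
-- what changed: Replaces the one-pass bucketing into a growing dict by a two-phase decomposition: first dedup the occurrence values in first-appearance order (dict.fromkeys), then build each group with a filtering pass over the items in a dict comprehension.
import Mathlib
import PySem

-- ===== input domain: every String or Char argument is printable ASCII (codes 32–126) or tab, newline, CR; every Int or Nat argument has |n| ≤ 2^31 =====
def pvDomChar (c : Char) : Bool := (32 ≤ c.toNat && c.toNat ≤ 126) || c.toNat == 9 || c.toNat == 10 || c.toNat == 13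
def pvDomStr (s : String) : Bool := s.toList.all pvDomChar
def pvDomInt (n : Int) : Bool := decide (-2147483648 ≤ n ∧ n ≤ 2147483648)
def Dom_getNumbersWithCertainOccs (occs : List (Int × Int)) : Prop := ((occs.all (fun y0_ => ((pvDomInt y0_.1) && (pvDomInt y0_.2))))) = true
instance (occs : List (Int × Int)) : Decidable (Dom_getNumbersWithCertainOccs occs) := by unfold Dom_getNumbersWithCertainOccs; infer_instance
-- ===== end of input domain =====

-- B replaces A's one-pass bucketing into a growing dict by a two-phase decomposition
-- (dedup the values in first-appearance order, then one filtering pass per group);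
-- same result, not faster.

-- ===== PORT A =====
-- A: for num in occs.keys(): bucket num under occs[num] (append to existing list or start a new one).
-- occs is a dict[int,int]; its association list is modelled as PySem.Dict.mk occs (keys are unique, see Pre_).
-- occs[num] is ((Dict.mk occs).get? num).getD 0 — the getD 0 is never taken: num ranges over the keys.
def getNumbersWithCertainOccs (occs : List (Int × Int)) : List (Int × List Int) :=
  (((PySem.Dict.mk occs).keys).foldl
    (fun (acc : PySem.Dict Int (List Int)) num =>
      let c := (((PySem.Dict.mk occs).get? num).getD 0)
      if acc.contains c then acc.modify c [] (· ++ [num]) else acc.insert c [num])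
    PySem.Dict.empty).items

-- ===== PORT B =====
-- B: order = list(dict.fromkeys(values)) (= PySem.List.dedup), then the dict comprehension
-- {c: [num for num, v in items if v == c] for c in order}, built key by key (keys of order are distinct).
def getNumbersWithCertainOccs_alt (occs : List (Int × Int)) : List (Int × List Int) :=
  (let order : List Int := PySem.List.dedup (occs.map (fun p => p.2))
   order.foldl
     (fun (d : PySem.Dict Int (List Int)) c =>
       d.insert c ((occs.filter (fun p => p.2 == c)).map (fun p => p.1)))
     PySem.Dict.empty).items

-- ===== PRECONDITION & SPEC =====
-- A's parameter is a Python dict, whose association list cannot contain a duplicated key;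
-- Pre_ states exactly that dict invariant (it excludes no input an actual call of A can receive).
def Pre_getNumbersWithCertainOccs (occs : List (Int × Int)) : Prop := (occs.map Prod.fst).Nodup
instance (occs : List (Int × Int)) : Decidable (Pre_getNumbersWithCertainOccs occs) := by unfold Pre_getNumbersWithCertainOccs; infer_instance
def pvWitness_getNumbersWithCertainOccs : (List (Int × Int)) := [(1, 2), (3, 2), (4, 1)]

def Spec_getNumbersWithCertainOccs (occs : List (Int × Int)) (out : List (Int × List Int)) : Prop := out = getNumbersWithCertainOccs_alt occs
instance (occs : List (Int × Int)) (out : List (Int × List Int)) : Decidable (Spec_getNumbersWithCertainOccs occs out) := by unfold Spec_getNumbersWithCertainOccs; infer_instance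

-- ===== CLAIM (what is proved, stated in full; the proofs are below) =====
def Claim_equal_getNumbersWithCertainOccs : Prop := ∀ (occs : List (Int × Int)), Dom_getNumbersWithCertainOccs occs → Pre_getNumbersWithCertainOccs occs → Spec_getNumbersWithCertainOccs occs (getNumbersWithCertainOccs occs)

-- ===== LEMMAS AND PROOFS =====

-- The one step of A's loop is an unconditional modify (Python d[k].append vs d[k] = [..] both set d[k]).
lemma stepA_eq_modify (acc : PySem.Dict Int (List Int)) (c num : Int) :
    (if acc.contains c then acc.modify c [] (· ++ [num]) else acc.insert c [num])
      = acc.modify c [] (· ++ [num]) := by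
  by_cases h : acc.contains c = true
  · simp [h]
  · simp [h, PySem.Dict.modify,
      PySem.Dict.getD_of_not_contains acc (d0 := []) (k := c) (Bool.not_eq_true _ ▸ h)]

-- Looping over the keys of the dict and looking each key up equals folding over the pairs directly.
lemma foldl_keys_lookup (occs : List (Int × Int)) (hnd : (occs.map Prod.fst).Nodup)
    {β : Type} (f : β → Int → Int → β) (init : β) :
    (occs.map Prod.fst).foldl
        (fun acc num => f acc ((((PySem.Dict.mk occs).get? num).getD 0)) num) init
      = occs.foldl (fun acc p => f acc p.2 p.1) init := by
  induction occs generalizing init with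
  | nil => rfl
  | cons hd tl ih =>
    obtain ⟨k, v⟩ := hd
    simp only [List.map_cons, List.foldl_cons]
    have hk : ((PySem.Dict.mk ((k, v) :: tl)).get? k).getD 0 = v := by
      simp [PySem.Dict.get?_mk_cons]
    rw [hk]
    have hnd' : (tl.map Prod.fst).Nodup := (List.nodup_cons.mp hnd).2
    have hnotmem : k ∉ tl.map Prod.fst := (List.nodup_cons.mp hnd).1
    have hcongr :
        (tl.map Prod.fst).foldl
            (fun acc num => f acc ((((PySem.Dict.mk ((k, v) :: tl)).get? num).getD 0)) num)
            (f init v k)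
          = (tl.map Prod.fst).foldl
              (fun acc num => f acc ((((PySem.Dict.mk tl).get? num).getD 0)) num)
              (f init v k) := by
      apply PySem.List.foldl_congr_mem
      intro acc x hx
      have hne : (k == x) = false :=
        beq_eq_false_iff_ne.mpr (fun he => hnotmem (he ▸ hx))
      rw [PySem.Dict.get?_mk_cons, hne]
      simp
    rw [hcongr, ih hnd' (f init v k)]

-- Each bucket of the modify-fold is the filter of occs at that value (keys swapped into lemma shape).
lemma bucket_fold_getD (occs : List (Int × Int)) (c : Int) :
    (occs.foldl (fun (d : PySem.Dict Int (List Int)) p => d.modify p.2 [] (· ++ [p.1]))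
        PySem.Dict.empty).getD c []
      = (occs.filter (fun p => p.2 == c)).map (fun p => p.1) := by
  have h := PySem.Dict.getD_foldl_modify_append (occs.map (fun p => (p.2, p.1)))
      (PySem.Dict.empty) c
  rw [List.foldl_map] at h
  simpa [List.filter_map, List.map_map, Function.comp] using h

lemma bucket_fold_keys (occs : List (Int × Int)) :
    (occs.foldl (fun (d : PySem.Dict Int (List Int)) p => d.modify p.2 [] (· ++ [p.1]))
        PySem.Dict.empty).keys
      = PySem.List.dedup (occs.map (fun p => p.2)) := by
  have h := PySem.Dict.keys_foldl_modify_key occs (fun p : Int × Int => p.2) []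
      (fun _ p v => v ++ [p.1]) PySem.Dict.empty
  simpa [PySem.Set.update, PySem.Set.ofList, PySem.Dict.keys_empty, PySem.Set.empty] using h

-- ===== VERDICT (by name: the statement is the Claim_ definition above) =====
theorem getNumbersWithCertainOccs_spec : Claim_equal_getNumbersWithCertainOccs := by
  intro occs _ hpre
  unfold Spec_getNumbersWithCertainOccs getNumbersWithCertainOccs getNumbersWithCertainOccs_alt
  have hkeys : (PySem.Dict.mk occs).keys = occs.map Prod.fst := by
    simp [PySem.Dict.keys_mk]
  rw [hkeys]
  have hA :
      (occs.map Prod.fst).foldl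
          (fun (acc : PySem.Dict Int (List Int)) num =>
            let c := (((PySem.Dict.mk occs).get? num).getD 0)
            if acc.contains c then acc.modify c [] (· ++ [num]) else acc.insert c [num])
          PySem.Dict.empty
        = occs.foldl (fun (d : PySem.Dict Int (List Int)) p => d.modify p.2 [] (· ++ [p.1]))
            PySem.Dict.empty := by
    have := foldl_keys_lookup occs hpre
        (fun (acc : PySem.Dict Int (List Int)) c num => acc.modify c [] (· ++ [num]))
        PySem.Dict.empty
    rw [← this]
    apply PySem.List.foldl_congr_mem
    intro acc x _
    exact stepA_eq_modify acc _ x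
  rw [hA]
  set d := occs.foldl (fun (d : PySem.Dict Int (List Int)) p => d.modify p.2 [] (· ++ [p.1]))
      PySem.Dict.empty with hd
  have hndk : d.keys.Nodup := by
    rw [hd]
    exact PySem.Dict.nodup_keys_foldl_modify_key occs (fun p : Int × Int => p.2) []
      (fun _ p v => v ++ [p.1]) PySem.Dict.empty (by simp)
  -- left side: items of the bucket fold, as a map over its (deduped) keys
  rw [PySem.Dict.items_eq_map_keys d hndk []]
  have hk : d.keys = PySem.List.dedup (occs.map (fun p => p.2)) := bucket_fold_keys occs
  -- right side: items of B's fresh-key insert fold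
  have horder : (PySem.List.dedup (occs.map (fun p => p.2))).Nodup :=
    PySem.List.nodup_dedup _
  have hB :
      ((PySem.List.dedup (occs.map (fun p => p.2))).foldl
          (fun (dd : PySem.Dict Int (List Int)) c =>
            dd.insert c ((occs.filter (fun p => p.2 == c)).map (fun p => p.1)))
          PySem.Dict.empty).items
        = (PySem.List.dedup (occs.map (fun p => p.2))).map
            (fun c => (c, (occs.filter (fun p => p.2 == c)).map (fun p => p.1))) := by
    have h := PySem.Dict.items_foldl_insert_fresh
        (l := PySem.List.dedup (occs.map (fun p => p.2)))
        (k := fun c : Int => c)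
        (v := fun c => (occs.filter (fun p => p.2 == c)).map (fun p => p.1))
        (d := PySem.Dict.empty)
        (by intro a _; simp [PySem.Dict.contains_empty])
        (by simpa using horder)
    simpa using h
  rw [hB, hk]
  apply List.map_congr_left
  intro c _
  rw [bucket_fold_getD occs c]
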